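-- pv_equiv track=rewrite | github.com/naveen767574/careerai | backend/app/services/role_comparator.py | _compute_common_skills
-- ===== SOURCE A (Python) =====
-- def _compute_common_skills(required_by_role: dict[int, list[str]]) -> list[str]:
--     skill_sets = []
--     for skills in required_by_role.values():
--         skill_sets.append({s.lower() for s in skills})
--     if not skill_sets:
--         return []
--     common = set.intersection(*skill_sets)
--     ordered = []
--     seen = set()
--     for skills in required_by_role.values():
--         for s in skills:
--             if s.lower() in common and s.lower() not in seen:
--                 ordered.append(s)
--                 seen.add(s.lower())
--     return ordered
-- ===== SOURCE B (Python) =====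
-- def _compute_common_skills(required_by_role: dict[int, list[str]]) -> list[str]:
--     n = len(required_by_role)
--     tally = {}
--     for skills in required_by_role.values():
--         for low in dict.fromkeys(s.lower() for s in skills):
--             tally[low] = tally.get(low, 0) + 1
--     first = {}
--     for skills in required_by_role.values():
--         for s in skills:
--             first.setdefault(s.lower(), s)
--     return [s for low, s in first.items() if tally.get(low, 0) == n]
-- ===== Notes on version B (the rewrite author's own statement) =====
-- stated objective: alternative
-- what changed: Replaces per-role sets + set.intersection and the seen-set/append output loop with two dict tables: a frequency table counting each lowercased skill once per role (common iff tally == number of roles), and an insertion-ordered first-occurrence dict built with setdefault; the result is a final comprehension filtering that dict's items by the tally threshold.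
import Mathlib
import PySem

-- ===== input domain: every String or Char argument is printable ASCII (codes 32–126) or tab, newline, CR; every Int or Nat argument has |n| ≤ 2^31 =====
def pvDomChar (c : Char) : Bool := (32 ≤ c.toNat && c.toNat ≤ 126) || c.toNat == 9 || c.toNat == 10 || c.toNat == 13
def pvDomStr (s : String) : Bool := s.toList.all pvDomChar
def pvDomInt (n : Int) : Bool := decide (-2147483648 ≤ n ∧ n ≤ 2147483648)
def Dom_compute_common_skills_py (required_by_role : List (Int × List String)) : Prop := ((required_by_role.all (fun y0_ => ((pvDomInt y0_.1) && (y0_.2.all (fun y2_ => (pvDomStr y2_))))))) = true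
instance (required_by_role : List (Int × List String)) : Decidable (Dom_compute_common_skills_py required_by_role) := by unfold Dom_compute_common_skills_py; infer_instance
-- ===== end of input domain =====

-- B replaces per-role sets + set.intersection + the seen-set output loop with a frequency table
-- (count each lowered skill once per role; common ⟺ tally = number of roles) and an ordered
-- first-occurrence dict built with setdefault, filtered at the end; same cost, proved equivalent on all inputs.

-- ===== PORT A =====
def compute_common_skills_py (required_by_role : List (Int × List String)) : List String :=
  let vals := (PySem.Dict.ofList required_by_role).values
  -- skill_sets = []; for skills in values: skill_sets.append({s.lower() for s in skills})
  let skill_sets := vals.foldl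
    (fun acc skills => acc ++ [PySem.Set.ofList (skills.map PySem.Str.lower)]) []
  match skill_sets with
  | [] => []
  | s0 :: rest =>
    -- common = set.intersection(*skill_sets)
    let common := rest.foldl PySem.Set.inter s0
    -- ordered = []; seen = set(); nested loop appending first occurrences of common skills
    let res := vals.foldl (fun (p : List String × PySem.Set String) skills =>
      skills.foldl (fun (p : List String × PySem.Set String) s =>
        if common.contains (PySem.Str.lower s) && !(p.2.contains (PySem.Str.lower s)) then
          (p.1 ++ [s], p.2.add (PySem.Str.lower s))
        else p) p) ([], PySem.Set.empty)
    res.1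

-- ===== PORT B =====
def compute_common_skills_py_alt (required_by_role : List (Int × List String)) : List String :=
  let d := PySem.Dict.ofList required_by_role
  let n := d.size
  -- tally = {}; for skills: for low in dict.fromkeys(s.lower() for s in skills): tally[low] = tally.get(low,0)+1
  let tally := d.values.foldl (fun (t : PySem.Dict String Int) skills =>
      (PySem.List.dedup (skills.map PySem.Str.lower)).foldl
        (fun (t : PySem.Dict String Int) low => t.modify low 0 (· + 1)) t)
    PySem.Dict.empty
  -- first = {}; for skills: for s in skills: first.setdefault(s.lower(), s)
  let first := d.values.foldl (fun (f : PySem.Dict String String) skills =>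
      skills.foldl (fun (f : PySem.Dict String String) s =>
        f.setdefault (PySem.Str.lower s) s) f)
    PySem.Dict.empty
  -- [s for low, s in first.items() if tally.get(low, 0) == n]
  (first.items.filter (fun p => tally.getD p.1 0 == (n : Int))).map (·.2)

-- ===== PRECONDITION & SPEC =====
def Spec_compute_common_skills_py (required_by_role : List (Int × List String)) (out : List String) : Prop := out = compute_common_skills_py_alt required_by_role
instance (required_by_role : List (Int × List String)) (out : List String) : Decidable (Spec_compute_common_skills_py required_by_role out) := by unfold Spec_compute_common_skills_py; infer_instance

-- ===== CLAIM (what is proved, stated in full; the proofs are below) =====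
def Claim_equal_compute_common_skills_py : Prop := ∀ (required_by_role : List (Int × List String)), Dom_compute_common_skills_py required_by_role → Spec_compute_common_skills_py required_by_role (compute_common_skills_py required_by_role)

-- ===== LEMMAS AND PROOFS =====

-- A's skill_sets-building loop is a map
theorem pv_foldl_append_map {α β : Type} (f : α → β) (l : List α) (acc : List β) :
    l.foldl (fun acc x => acc ++ [f x]) acc = acc ++ l.map f := by
  induction l generalizing acc with
  | nil => simp
  | cons x xs ih => simp [List.foldl, ih]

-- a nested foldl over a list of lists is a foldl over the flattening
theorem pv_foldl_nest {α σ : Type} (g : σ → α → σ) (vals : List (List α)) (init : σ) :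
    vals.foldl (fun st l => l.foldl g st) init = (vals.flatMap id).foldl g init := by
  induction vals generalizing init with
  | nil => simp
  | cons v vs ih => simp [List.foldl, List.foldl_append, ih]

-- membership in the folded intersection
theorem pv_mem_inter_fold (rest : List (PySem.Set String)) (s0 : PySem.Set String) (x : String) :
    x ∈ rest.foldl PySem.Set.inter s0 ↔ x ∈ s0 ∧ ∀ t ∈ rest, x ∈ t := by
  induction rest generalizing s0 with
  | nil => simp
  | cons t ts ih =>
    simp only [List.foldl, ih, PySem.Set.mem_inter, List.mem_cons]
    constructor
    · rintro ⟨⟨h0, ht⟩, hts⟩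
      refine ⟨h0, fun u hu => ?_⟩
      rcases hu with rfl | hu
      · exact ht
      · exact hts u hu
    · rintro ⟨h0, hall⟩
      exact ⟨⟨h0, hall t (Or.inl rfl)⟩, fun u hu => hall u (Or.inr hu)⟩

-- B's nested tally loop is Counter of the concatenation of the per-role deduped lists
theorem pv_tally_eq_counter (vals : List (List String)) :
    vals.foldl (fun (d : PySem.Dict String Int) skills =>
        (PySem.List.dedup (skills.map PySem.Str.lower)).foldl
          (fun (d : PySem.Dict String Int) low => d.modify low 0 (· + 1)) d)
      PySem.Dict.empty
    = PySem.Dict.counter (vals.flatMap (fun skills => PySem.List.dedup (skills.map PySem.Str.lower))) := by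
  rw [PySem.Dict.counter_eq_foldl]
  generalize (PySem.Dict.empty : PySem.Dict String Int) = d
  induction vals generalizing d with
  | nil => simp
  | cons v vs ih =>
    simp only [List.foldl_cons, List.flatMap_cons, List.foldl_append]
    exact ih _

-- a sum of 0/1 terms equals the length iff every term is 1
theorem pv_sum_eq_len (l : List Nat) (h : ∀ x ∈ l, x ≤ 1) :
    (l.sum = l.length ↔ ∀ x ∈ l, x = 1) := by
  induction l with
  | nil => simp
  | cons a t ih =>
    have ha : a ≤ 1 := h a (List.mem_cons_self)
    have ht : ∀ x ∈ t, x ≤ 1 := fun x hx => h x (List.mem_cons_of_mem _ hx)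
    have hsum : t.sum ≤ t.length := by
      clear ih ha h; induction t with
      | nil => simp
      | cons b u ihu =>
        have := ht b (List.mem_cons_self)
        have := ihu (fun x hx => ht x (List.mem_cons_of_mem _ hx))
        simp only [List.sum_cons, List.length_cons]; omega
    simp only [List.sum_cons, List.length_cons, List.mem_cons]
    rw [show (∀ x, x = a ∨ x ∈ t → x = 1) ↔ (a = 1 ∧ ∀ x ∈ t, x = 1) by
      constructor
      · exact fun H => ⟨H a (Or.inl rfl), fun x hx => H x (Or.inr hx)⟩
      · rintro ⟨h1, h2⟩ x hx
        rcases hx with rfl | hx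
        · exact h1
        · exact h2 x hx]
    rw [← ih ht]
    omega

-- count in the flatMap of deduped lists = number of roles whose lowered skills contain x
theorem pv_count_flatMap (vals : List (List String)) (x : String) :
    (vals.flatMap (fun skills => PySem.List.dedup (skills.map PySem.Str.lower))).count x
      = (vals.map (fun skills => (PySem.List.dedup (skills.map PySem.Str.lower)).count x)).sum := by
  induction vals with
  | nil => simp
  | cons v vs ih =>
    rw [List.flatMap_cons, List.count_append, List.map_cons, List.sum_cons, ih]

theorem pv_count_dedup_le_one (ys : List String) (x : String) :
    (PySem.List.dedup ys).count x ≤ 1 := by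
  have hn : (PySem.List.dedup ys).Nodup := PySem.List.nodup_dedup ys
  exact List.nodup_iff_count_le_one.mp hn x

theorem pv_count_dedup_eq_one_iff (ys : List String) (x : String) :
    (PySem.List.dedup ys).count x = 1 ↔ x ∈ ys := by
  have hn : (PySem.List.dedup ys).Nodup := PySem.List.nodup_dedup ys
  constructor
  · intro h
    have hm : x ∈ PySem.List.dedup ys := by
      by_contra hm
      rw [List.count_eq_zero_of_not_mem hm] at h
      exact absurd h (by decide)
    exact (PySem.List.mem_dedup ys x).mp hm
  · intro h
    have hm : x ∈ PySem.List.dedup ys := (PySem.List.mem_dedup ys x).mpr h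
    have h1 := List.count_pos_iff.mpr hm
    have h2 := List.nodup_iff_count_le_one.mp hn x
    omega

-- the intersection test of A and the tally test of B agree (nonempty role list)
theorem pv_cond_agree (v : List String) (vt : List (List String)) (low : String) :
    ((vt.map (fun skills => PySem.Set.ofList (skills.map PySem.Str.lower))).foldl
        PySem.Set.inter (PySem.Set.ofList (v.map PySem.Str.lower))).contains low
    = (((v :: vt).foldl (fun (d : PySem.Dict String Int) skills =>
          (PySem.List.dedup (skills.map PySem.Str.lower)).foldl
            (fun (d : PySem.Dict String Int) lo => d.modify lo 0 (· + 1)) d)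
        PySem.Dict.empty).getD low 0 == ((v :: vt).length : Int)) := by
  rw [pv_tally_eq_counter, Bool.eq_iff_iff, PySem.Set.contains_iff, pv_mem_inter_fold, beq_iff_eq,
      PySem.Dict.getD_counter, pv_count_flatMap]
  have hle : ∀ x ∈ ((v :: vt).map (fun skills => (PySem.List.dedup (skills.map PySem.Str.lower)).count low)), x ≤ 1 := by
    intro x hx
    rcases List.mem_map.mp hx with ⟨sk, _, rfl⟩
    exact pv_count_dedup_le_one _ _
  have hcast : (((((v :: vt).map (fun skills => (PySem.List.dedup (skills.map PySem.Str.lower)).count low)).sum : Nat) : Int) = ((v :: vt).length : Int))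
      ↔ ((v :: vt).map (fun skills => (PySem.List.dedup (skills.map PySem.Str.lower)).count low)).sum
        = ((v :: vt).map (fun skills => (PySem.List.dedup (skills.map PySem.Str.lower)).count low)).length := by
    rw [List.length_map]; constructor <;> intro h <;> [exact_mod_cast h; exact_mod_cast h]
  rw [hcast, pv_sum_eq_len _ hle]
  constructor
  · rintro ⟨h0, hall⟩ x hx
    rcases List.mem_map.mp hx with ⟨sk, hsk, rfl⟩
    rcases List.mem_cons.mp hsk with rfl | hsk'
    · exact (pv_count_dedup_eq_one_iff _ _).mpr (by simpa [PySem.Set.mem_ofList] using h0)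
    · have := hall _ (List.mem_map.mpr ⟨sk, hsk', rfl⟩)
      exact (pv_count_dedup_eq_one_iff _ _).mpr (by simpa [PySem.Set.mem_ofList] using this)
  · intro H
    refine ⟨?_, ?_⟩
    · have := H _ (List.mem_map.mpr ⟨v, List.mem_cons_self, rfl⟩)
      simpa [PySem.Set.mem_ofList] using (pv_count_dedup_eq_one_iff _ _).mp this
    · intro t ht
      rcases List.mem_map.mp ht with ⟨sk, hsk, rfl⟩
      have := H _ (List.mem_map.mpr ⟨sk, List.mem_cons_of_mem _ hsk, rfl⟩)
      simpa [PySem.Set.mem_ofList] using (pv_count_dedup_eq_one_iff _ _).mp this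

-- TRANSFER: A's seen-set/append loop equals filtering B's setdefault dict, for any common-test c
theorem pv_contains_add (s : PySem.Set String) (x y : String) :
    (s.add x).contains y = (s.contains y || y == x) := by
  rw [Bool.eq_iff_iff]
  simp [PySem.Set.mem_add, Bool.or_eq_true, beq_iff_eq]

theorem pv_transfer (c : String → Bool) (xs : List String) (acc : List String)
    (seen : PySem.Set String) (f : PySem.Dict String String)
    (hacc : acc = (f.items.filter (fun p => c p.1)).map (·.2))
    (hseen : ∀ low, seen.contains low = (f.contains low && c low)) :
    (xs.foldl (fun (p : List String × PySem.Set String) s =>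
        if c (PySem.Str.lower s) && !(p.2.contains (PySem.Str.lower s)) then
          (p.1 ++ [s], p.2.add (PySem.Str.lower s))
        else p) (acc, seen)).1
    = ((xs.foldl (fun (f : PySem.Dict String String) s =>
          f.setdefault (PySem.Str.lower s) s) f).items.filter (fun p => c p.1)).map (·.2) := by
  induction xs generalizing acc seen f with
  | nil => simpa using hacc
  | cons s xs ih =>
    simp only [List.foldl_cons]
    by_cases hc : f.contains (PySem.Str.lower s) = true
    · rw [PySem.Dict.setdefault_of_contains _ _ hc]
      have hcond : (c (PySem.Str.lower s) && !(seen.contains (PySem.Str.lower s))) = false := by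
        rw [hseen, hc]; cases c (PySem.Str.lower s) <;> simp
      rw [hcond]
      exact ih acc seen f hacc hseen
    · have hc' : f.contains (PySem.Str.lower s) = false := by
        cases h : f.contains (PySem.Str.lower s)
        · rfl
        · exact absurd h hc
      rw [PySem.Dict.setdefault_of_not_contains _ _ hc']
      have hsn : seen.contains (PySem.Str.lower s) = false := by
        rw [hseen, hc']; simp
      have hitems : (f.insert (PySem.Str.lower s) s).items = f.items ++ [(PySem.Str.lower s, s)] :=
        PySem.Dict.items_insert_of_not_contains _ _ hc'
      by_cases hcl : c (PySem.Str.lower s) = true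
      · rw [hsn, hcl]
        simp only [Bool.not_false, Bool.and_self, if_true]
        apply ih
        · rw [hitems, List.filter_append, List.map_append, ← hacc]
          simp [hcl]
        · intro low
          rw [pv_contains_add, PySem.Dict.contains_insert, hseen low]
          by_cases hl : low = PySem.Str.lower s
          · subst hl; simp [hcl, hc']
          · have hlb : (low == PySem.Str.lower s) = false := by simpa using hl
            simp [hlb]
      · have hcl' : c (PySem.Str.lower s) = false := by
          cases h : c (PySem.Str.lower s)
          · rfl
          · exact absurd h hcl
        rw [hsn, hcl']
        simp only [Bool.false_and]
        apply ih
        · rw [hitems, List.filter_append, List.map_append, ← hacc]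
          simp [hcl']
        · intro low
          rw [PySem.Dict.contains_insert, hseen low]
          by_cases hl : low = PySem.Str.lower s
          · subst hl; simp [hcl', hc']
          · have hlb : (low == PySem.Str.lower s) = false := by simpa using hl
            simp [hlb]

-- ===== VERDICT (by name: the statement is the Claim_ definition above) =====
theorem compute_common_skills_py_spec : Claim_equal_compute_common_skills_py := by
  intro r _
  unfold Spec_compute_common_skills_py compute_common_skills_py compute_common_skills_py_alt
  have hsize : (PySem.Dict.ofList r).size = (PySem.Dict.ofList r).values.length := by
    simp [PySem.Dict.size, PySem.Dict.values]
  cases hv : (PySem.Dict.ofList r).values with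
  | nil =>
    simp [hv, PySem.Dict.empty]
  | cons v vt =>
    simp only [pv_foldl_append_map, List.nil_append, List.map_cons, hsize, hv]
    have hcond := fun low => pv_cond_agree v vt low
    calc
      ((v :: vt).foldl (fun (p : List String × PySem.Set String) skills =>
          skills.foldl (fun (p : List String × PySem.Set String) s =>
            if ((vt.map (fun skills => PySem.Set.ofList (skills.map PySem.Str.lower))).foldl
                  PySem.Set.inter (PySem.Set.ofList (v.map PySem.Str.lower))).contains (PySem.Str.lower s)
                && !(p.2.contains (PySem.Str.lower s)) then
              (p.1 ++ [s], p.2.add (PySem.Str.lower s))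
            else p) p) ([], PySem.Set.empty)).1
        = (((v :: vt).flatMap id).foldl (fun (p : List String × PySem.Set String) s =>
            if (((v :: vt).foldl (fun (d : PySem.Dict String Int) skills =>
                    (PySem.List.dedup (skills.map PySem.Str.lower)).foldl
                      (fun (d : PySem.Dict String Int) lo => d.modify lo 0 (· + 1)) d)
                  PySem.Dict.empty).getD (PySem.Str.lower s) 0 == ((v :: vt).length : Int))
                && !(p.2.contains (PySem.Str.lower s)) then
              (p.1 ++ [s], p.2.add (PySem.Str.lower s))
            else p) ([], PySem.Set.empty)).1 := by
          rw [pv_foldl_nest]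
          simp only [hcond]
      _ = _ := by
          rw [pv_foldl_nest
                (fun (f : PySem.Dict String String) s => f.setdefault (PySem.Str.lower s) s)
                (v :: vt) PySem.Dict.empty]
          exact pv_transfer
            (fun low => (((v :: vt).foldl (fun (d : PySem.Dict String Int) skills =>
                  (PySem.List.dedup (skills.map PySem.Str.lower)).foldl
                    (fun (d : PySem.Dict String Int) lo => d.modify lo 0 (· + 1)) d)
                PySem.Dict.empty).getD low 0 == ((v :: vt).length : Int)))
            ((v :: vt).flatMap id) [] PySem.Set.empty PySem.Dict.empty
            (by simp [PySem.Dict.empty])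
            (by intro low; simp [PySem.Dict.contains_empty])
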